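-- pv_equiv track=rewrite | github.com/namonroyr/Proyecto-Criptograf-a | grafo1.py | tipo3
-- ===== SOURCE A (Python) =====
-- def tipo1(x,y,n):
--   paths = set()
--   curr = (x,y)
--   for i in range(n+1):
--     next = (curr[0] + 1 , curr[1] + i)
--     segment = (curr, next)
--     curr = next
--     paths.add(segment)
--   return paths
--
-- def tipo2(x,y,n):
--   type1 = tipo1(x,y,n)
--   paths = set()
--   for segment in type1:
--     last = segment[1]
--     altura = last[1]
--     temp = tipo1(*last, n)
--     paths = paths.union(temp)
--   return paths
--
-- def tipo3(x,y,n):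
--   type2 = tipo2(x,y,n)
--   paths = set()
--   for segment in type2:
--     last =  segment[1]
--     pendiente = segment[1][1]-segment[0][1]
--     temp = tipo1(*last,pendiente)
--     paths = paths.union(temp)
--   return paths
-- ===== SOURCE B (Python) =====
-- def tipo3(x, y, n):
--     # Closed-form path generation (triangular numbers) in one function with
--     # two union folds, replacing the tipo1/tipo2/tipo3 cursor-walking pipeline.
--     def path(px, py, m):
--         # staircase path from (px, py) with slopes 0..m, as a segment set
--         return {((px + i, py + i * (i - 1) // 2), (px + i + 1, py + i * (i + 1) // 2))
--                 for i in range(m + 1)}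
--     second = set()
--     for (_, end) in path(x, y, n):
--         second = second.union(path(*end, n))
--     out = set()
--     for (start, end) in second:
--         out = out.union(path(*end, end[1] - start[1]))
--     return out
-- ===== Notes on version B (the rewrite author's own statement) =====
-- stated objective: simpler
-- what changed: B collapses the tipo1/tipo2/tipo3 pipeline into one function: each staircase path is produced by a closed-form set comprehension using triangular numbers i*(i-1)//2 and i*(i+1)//2 instead of tipo1's cursor-walking accumulation loop, and the three named stages become two inline union folds.
import Mathlib
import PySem

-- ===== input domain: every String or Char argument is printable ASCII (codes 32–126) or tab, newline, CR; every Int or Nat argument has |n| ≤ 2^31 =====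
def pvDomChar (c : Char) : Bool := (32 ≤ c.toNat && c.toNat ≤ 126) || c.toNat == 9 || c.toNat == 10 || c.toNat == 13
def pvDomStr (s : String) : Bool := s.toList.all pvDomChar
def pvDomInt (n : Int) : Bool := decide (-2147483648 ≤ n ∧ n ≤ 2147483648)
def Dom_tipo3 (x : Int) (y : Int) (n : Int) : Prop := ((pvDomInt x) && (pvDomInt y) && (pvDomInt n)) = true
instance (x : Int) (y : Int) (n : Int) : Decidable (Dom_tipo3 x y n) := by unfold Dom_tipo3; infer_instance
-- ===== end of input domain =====

-- B fuses A's three set-building passes into one triple loop with closed-form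
-- triangular-number arithmetic (objective: alternative; same result set).

-- ===== PORT A =====
def tipo1A (x : Int) (y : Int) (n : Int) : PySem.Set ((Int × Int) × (Int × Int)) :=
  (((PySem.List.pyRange 0 (n+1) 1).foldl
      (fun (st : (Int × Int) × PySem.Set ((Int × Int) × (Int × Int))) i =>
        let next := (st.1.1 + 1, st.1.2 + i)
        let segment := (st.1, next)
        (next, PySem.Set.add st.2 segment))
      ((x, y), PySem.Set.empty))).2

def tipo2A (x : Int) (y : Int) (n : Int) : PySem.Set ((Int × Int) × (Int × Int)) :=
  (tipo1A x y n).foldl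
    (fun paths segment =>
      let last := segment.2
      PySem.Set.union paths (tipo1A last.1 last.2 n))
    PySem.Set.empty

def tipo3 (x : Int) (y : Int) (n : Int) : List ((Int × Int) × (Int × Int)) :=
  (tipo2A x y n).foldl
    (fun paths segment =>
      let last := segment.2
      let pendiente := segment.2.2 - segment.1.2
      PySem.Set.union paths (tipo1A last.1 last.2 pendiente))
    PySem.Set.empty

-- ===== PORT B =====
-- B-side helper: the set comprehension 'path' of Source B (closed-form triangular numbers)
def pathB (px py m : Int) : PySem.Set ((Int × Int) × (Int × Int)) :=
  PySem.Set.ofList ((PySem.List.pyRange 0 (m+1) 1).map (fun i =>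
    ((px + i, py + PySem.Int.floordiv (i*(i-1)) 2),
     (px + i + 1, py + PySem.Int.floordiv (i*(i+1)) 2))))

def tipo3_alt (x : Int) (y : Int) (n : Int) : List ((Int × Int) × (Int × Int)) :=
  let second :=
    (pathB x y n).foldl
      (fun second seg => PySem.Set.union second (pathB seg.2.1 seg.2.2 n))
      PySem.Set.empty
  second.foldl
    (fun out seg => PySem.Set.union out (pathB seg.2.1 seg.2.2 (seg.2.2 - seg.1.2)))
    PySem.Set.empty

-- ===== PRECONDITION & SPEC =====
def Spec_tipo3 (x : Int) (y : Int) (n : Int) (out : List ((Int × Int) × (Int × Int))) : Prop := out = tipo3_alt x y n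
instance (x : Int) (y : Int) (n : Int) (out : List ((Int × Int) × (Int × Int))) : Decidable (Spec_tipo3 x y n out) := by unfold Spec_tipo3; infer_instance

-- ===== CLAIM (what is proved, stated in full; the proofs are below) =====
def Claim_equal_tipo3 : Prop := ∀ (x : Int) (y : Int) (n : Int), Dom_tipo3 x y n → Spec_tipo3 x y n (tipo3 x y n)

-- ===== LEMMAS AND PROOFS =====

-- S i = 0 + 1 + ... + (i-1) as Python computes it: i*(i-1) // 2
def S (i : Int) : Int := PySem.Int.floordiv (i*(i-1)) 2

def segI (a b i : Int) : (Int × Int) × (Int × Int) :=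
  ((a + i, b + S i), (a + i + 1, b + S (i+1)))

def lst (x y : Int) (m : Nat) : List ((Int × Int) × (Int × Int)) :=
  (List.range m).map (fun (k : Nat) => segI x y (k : Int))

lemma floordiv_two_mul (c : Int) : PySem.Int.floordiv (2*c) 2 = c := by
  rw [PySem.Int.floordiv_eq_ediv_of_pos (by norm_num)]
  exact Int.mul_ediv_cancel_left c (by norm_num)

lemma S_succ (i : Int) : S (i+1) = S i + i := by
  obtain ⟨r, hr⟩ := Int.even_mul_succ_self (i-1)
  have h1 : i*(i-1) = 2*r := by linear_combination hr
  have h2 : (i+1)*((i+1)-1) = 2*(r+i) := by linear_combination hr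
  unfold S
  rw [h1, h2, floordiv_two_mul, floordiv_two_mul]

lemma S_zero : S 0 = 0 := by decide

lemma lst_succ (x y : Int) (m : Nat) : lst x y (m+1) = lst x y m ++ [segI x y (m:Int)] := by
  simp [lst, List.range_succ]

lemma fold1 (x y : Int) (m : Nat) :
    ((List.range m).map (fun k => ((k:Nat) : Int))).foldl
      (fun (st : (Int × Int) × PySem.Set ((Int × Int) × (Int × Int))) i =>
        let next := (st.1.1 + 1, st.1.2 + i)
        let segment := (st.1, next)
        (next, PySem.Set.add st.2 segment))
      ((x, y), PySem.Set.empty)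
    = ((x + m, y + S m), lst x y m) := by
  induction m with
  | zero => simp [lst, S_zero, PySem.Set.empty]
  | succ m ih =>
    rw [List.range_succ, List.map_append, List.foldl_append, ih]
    simp only [List.map_cons, List.map_nil, List.foldl_cons, List.foldl_nil]
    have hmem : (((x+(m:Int), y+S (m:Int)), (x+(m:Int)+1, y+S (m:Int)+(m:Int))) :
        (Int × Int) × (Int × Int)) ∉ lst x y m := by
      intro h
      simp only [lst, List.mem_map] at h
      obtain ⟨k, hk, he⟩ := h
      have hk' : k < m := List.mem_range.mp hk
      have h1 := congrArg (fun t => t.1.1) he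
      simp only [segI] at h1
      have h2 : (k:Int) = (m:Int) := by linarith
      have h3 : k = m := by exact_mod_cast h2
      omega
    show ((x+(m:Int)+1, y+S (m:Int)+(m:Int)),
          PySem.Set.add (lst x y m) ((x+(m:Int), y+S (m:Int)), (x+(m:Int)+1, y+S (m:Int)+(m:Int))))
        = ((x + ((m+1 : Nat):Int), y + S ((m+1:Nat):Int)), lst x y (m+1))
    rw [PySem.Set.add_of_not_mem hmem, lst_succ]
    simp only [Prod.mk.injEq]
    refine ⟨⟨by push_cast; ring, by push_cast [S_succ]; ring⟩, ?_⟩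
    congr 1
    simp [segI, S_succ, Prod.ext_iff]
    all_goals ring

lemma tipo1A_eq (x y n : Int) : tipo1A x y n = lst x y (n+1).toNat := by
  unfold tipo1A
  rw [PySem.List.pyRange_one]
  simp only [zero_add, sub_zero]
  rw [fold1]

lemma nodup_lst (x y : Int) (m : Nat) : (lst x y m).Nodup := by
  unfold lst
  refine List.Nodup.map_on ?_ (List.nodup_range)
  intro a _ b _ he
  have h1 := congrArg (fun t => t.1.1) he
  simp only [segI] at h1
  have h2 : (a : Int) = (b : Int) := by linarith
  exact_mod_cast h2

lemma pathB_eq (px py m : Int) : pathB px py m = lst px py (m+1).toNat := by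
  unfold pathB
  rw [PySem.List.pyRange_one]
  simp only [zero_add, sub_zero]
  have h2 : ∀ i : Int, PySem.Int.floordiv (i*(i+1)) 2 = S (i+1) := by
    intro i; unfold S; congr 1; ring
  have h1 : ∀ i : Int, PySem.Int.floordiv (i*(i-1)) 2 = S i := fun _ => rfl
  simp only [h1, h2, List.map_map]
  exact PySem.Set.ofList_eq_self_of_nodup _ (nodup_lst px py _)

-- ===== VERDICT (by name: the statement is the Claim_ definition above) =====
theorem tipo3_spec : Claim_equal_tipo3 := by
  intro x y n _
  unfold Spec_tipo3 tipo3 tipo3_alt tipo2A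
  simp only [tipo1A_eq, pathB_eq]
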